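-- pv_equiv track=rewrite | github.com/JoeAtEgypt/Critical-Thinking | Sorting/kadane.py | largest_sum_range
-- ===== SOURCE A (Python) =====
-- def largest_sum_range(kadane):
--     max_index, maxi = 0, kadane[0]
--
--     for i, num in enumerate(kadane):
--         if maxi < num:
--             maxi = num
--             max_index = i
--
--     for i in range(max_index, -1, -1):
--         if kadane[i] == 0:
--             return i, max_index
--
--     return 0, max_index
-- ===== SOURCE B (Python) =====
-- def largest_sum_range(kadane):
--     # Single forward pass: track the running max and snapshot the most recent
--     # zero index each time a new strict maximum is found.
--     maxi = kadane[0]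
--     max_index = 0
--     last_zero = 0
--     res_zero = 0
--     for i, num in enumerate(kadane):
--         if num == 0:
--             last_zero = i
--         if maxi < num:
--             maxi = num
--             max_index = i
--             res_zero = last_zero
--     return res_zero, max_index
-- ===== Notes on version B (the rewrite author's own statement) =====
-- stated objective: alternative
-- what changed: Replaced A's two-phase scheme (forward max scan, then a second backward scan over the list hunting for a zero) by one forward pass that tracks the latest zero index and snapshots it whenever a new strict maximum is found, so the backward re-scan disappears.
import Mathlib
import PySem

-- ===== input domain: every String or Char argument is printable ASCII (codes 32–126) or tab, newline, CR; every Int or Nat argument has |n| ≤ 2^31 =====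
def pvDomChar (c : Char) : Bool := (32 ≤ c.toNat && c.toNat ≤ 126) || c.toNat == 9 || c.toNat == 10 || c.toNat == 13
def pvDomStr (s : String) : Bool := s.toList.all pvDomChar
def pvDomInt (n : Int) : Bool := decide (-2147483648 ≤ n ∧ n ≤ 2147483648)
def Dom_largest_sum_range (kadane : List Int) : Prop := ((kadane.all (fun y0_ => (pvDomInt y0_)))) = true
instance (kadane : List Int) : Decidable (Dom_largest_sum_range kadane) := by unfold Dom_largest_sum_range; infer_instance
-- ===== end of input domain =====

-- B replaces A's forward max scan + backward zero re-scan by a single forward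
-- pass that snapshots the latest zero index at each new strict maximum
-- (objective: alternative decomposition, same O(n) cost).


-- ===== PORT A =====
-- body of A's first for-loop (running (max_index, maxi) state)
def lsrStepA (st : Int × Int) (p : Int × Int) : Int × Int :=
  if st.2 < p.2 then (p.1, p.2) else st

-- A's second loop: first index i in idxs with kadane[i] == 0 (early return)
def lsrFindZero (kadane : List Int) (idxs : List Int) : Option Int :=
  idxs.find? (fun i => PySem.List.pyGet? kadane i == some (0 : Int))

def largest_sum_range (kadane : List Int) : Int × Int :=
  -- reading the first element raises on the empty list (excluded by Pre_); getD 0 only totalizes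
  let st := (PySem.List.enumerate kadane).foldl lsrStepA
      (0, (PySem.List.pyGet? kadane 0).getD 0)
  match lsrFindZero kadane (PySem.List.pyRange st.1 (-1) (-1)) with
  | some i => (i, st.1)
  | none => (0, st.1)

-- ===== PORT B =====
-- body of B's single loop; state = (maxi, max_index, last_zero, res_zero)
def lsrStepB (st : Int × Int × Int × Int) (p : Int × Int) : Int × Int × Int × Int :=
  let lz := if p.2 = 0 then p.1 else st.2.2.1
  if st.1 < p.2 then (p.2, p.1, lz, lz) else (st.1, st.2.1, lz, st.2.2.2)

def largest_sum_range_alt (kadane : List Int) : Int × Int :=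
  let st := (PySem.List.enumerate kadane).foldl lsrStepB
      ((PySem.List.pyGet? kadane 0).getD 0, 0, 0, 0)
  (st.2.2.2, st.2.1)

-- ===== PRECONDITION & SPEC =====
-- Pre_ excludes only the empty list, on which Python A raises IndexError reading the first element.
def Pre_largest_sum_range (kadane : List Int) : Prop := kadane ≠ []
instance (kadane : List Int) : Decidable (Pre_largest_sum_range kadane) := by
  unfold Pre_largest_sum_range; infer_instance

def pvWitness_largest_sum_range : List Int := [3, 0, 5, -1]

def Spec_largest_sum_range (kadane : List Int) (out : Int × Int) : Prop := out = largest_sum_range_alt kadane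
instance (kadane : List Int) (out : Int × Int) : Decidable (Spec_largest_sum_range kadane out) := by unfold Spec_largest_sum_range; infer_instance

-- ===== CLAIM (what is proved, stated in full; the proofs are below) =====
def Claim_equal_largest_sum_range : Prop := ∀ (kadane : List Int), Dom_largest_sum_range kadane → Pre_largest_sum_range kadane → Spec_largest_sum_range kadane (largest_sum_range kadane)

-- ===== LEMMAS AND PROOFS =====

lemma lsr_enum_append (l : List Int) (x : Int) (s : Int) :
    PySem.List.enumerate (l ++ [x]) s
      = PySem.List.enumerate l s ++ [(s + (l.length : Int), x)] := by
  induction l generalizing s with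
  | nil => simp [PySem.List.enumerate_nil, PySem.List.enumerate_cons]
  | cons a t ih =>
      simp only [List.cons_append, PySem.List.enumerate_cons, ih, List.length_cons]
      have h : s + 1 + (t.length : Int) = s + ((t.length : Int) + 1) := by ring
      push_cast
      rw [h]

lemma lsr_pyGet?_append_lt (l : List Int) (x : Int) (i : Int)
    (h0 : 0 ≤ i) (h1 : i < (l.length : Int)) :
    PySem.List.pyGet? (l ++ [x]) i = PySem.List.pyGet? l i := by
  rw [PySem.List.pyGet?_of_nonneg (l ++ [x]) h0, PySem.List.pyGet?_of_nonneg l h0]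
  rw [List.getElem?_append_left (by omega : i.toNat < l.length)]

lemma lsr_findZero_append (l : List Int) (x : Int) (idxs : List Int)
    (h : ∀ i ∈ idxs, 0 ≤ i ∧ i < (l.length : Int)) :
    lsrFindZero (l ++ [x]) idxs = lsrFindZero l idxs := by
  induction idxs with
  | nil => rfl
  | cons a t ih =>
      have ha := h a (by simp)
      simp only [lsrFindZero, List.find?_cons] at *
      rw [lsr_pyGet?_append_lt l x a ha.1 ha.2]
      split
      · rfl
      · exact ih (fun i hi => h i (by simp [hi]))

-- the joint loop invariant, proved by appending one element at a time
lemma lsr_inv (l : List Int) (v : Int) :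
    (let sA := (PySem.List.enumerate l).foldl lsrStepA (0, v)
     let sB := (PySem.List.enumerate l).foldl lsrStepB (v, 0, 0, 0)
     sB.1 = sA.2 ∧ sB.2.1 = sA.1 ∧ 0 ≤ sA.1 ∧ sA.1 < max 1 (l.length : Int) ∧
     sB.2.2.1 = (lsrFindZero l (PySem.List.pyRange ((l.length : Int) - 1) (-1) (-1))).getD 0 ∧
     sB.2.2.2 = (lsrFindZero l (PySem.List.pyRange sA.1 (-1) (-1))).getD 0) := by
  induction l using List.reverseRecOn with
  | nil =>
      dsimp only [PySem.List.enumerate_nil, List.foldl_nil]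
      refine ⟨rfl, rfl, le_refl 0, by norm_num, ?_, ?_⟩ <;>
        norm_num [lsrFindZero, PySem.List.pyRange_neg_one, List.find?,
          PySem.List.pyGet?_zero]
  | append_singleton l x ih =>
      obtain ⟨h1, h2, h3, h4, h5, h6⟩ := ih
      dsimp only at h1 h2 h3 h4 h5 h6 ⊢
      rw [lsr_enum_append, List.foldl_append, List.foldl_append,
        List.foldl_cons, List.foldl_cons, List.foldl_nil, List.foldl_nil]
      by_cases hl : l = []
      · subst hl
        dsimp only [PySem.List.enumerate_nil, List.foldl_nil, List.length_nil,
          List.nil_append, List.length_cons, lsrStepA, lsrStepB]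
        clear h1 h2 h3 h4 h5 h6
        split_ifs <;>
          simp_all [lsrFindZero, PySem.List.pyRange_neg_one, List.find?]
      · have hn : (1 : Int) ≤ (l.length : Int) := by
          have := List.length_pos_iff.mpr hl; omega
        set sA := (PySem.List.enumerate l 0).foldl lsrStepA (0, v) with hsA
        set sB := (PySem.List.enumerate l 0).foldl lsrStepB (v, 0, 0, 0) with hsB
        have hmi : sA.1 < (l.length : Int) := by omega
        have hlen : ((l ++ [x]).length : Int) = (l.length : Int) + 1 := by simp
        have hcons : PySem.List.pyRange ((l.length : Int)) (-1) (-1)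
            = (l.length : Int) :: PySem.List.pyRange ((l.length : Int) - 1) (-1) (-1) :=
          PySem.List.pyRange_neg_one_cons (by omega)
        have hget : PySem.List.pyGet? (l ++ [x]) (l.length : Int) = some x :=
          PySem.List.pyGet?_append_length l [] x
        have hstab1 : lsrFindZero (l ++ [x])
              (PySem.List.pyRange ((l.length : Int) - 1) (-1) (-1))
            = lsrFindZero l (PySem.List.pyRange ((l.length : Int) - 1) (-1) (-1)) := by
          refine lsr_findZero_append _ _ _ (fun i hi => ?_)
          rw [PySem.List.mem_pyRange_neg_one] at hi
          omega
        have hstab2 : lsrFindZero (l ++ [x])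
              (PySem.List.pyRange sA.1 (-1) (-1))
            = lsrFindZero l (PySem.List.pyRange sA.1 (-1) (-1)) := by
          refine lsr_findZero_append _ _ _ (fun i hi => ?_)
          rw [PySem.List.mem_pyRange_neg_one] at hi
          omega
        -- the new last-zero value equals the backward scan from the new top index
        have hlz : (if x = 0 then ((l.length : Int)) else sB.2.2.1)
            = (lsrFindZero (l ++ [x])
                (PySem.List.pyRange ((l.length : Int)) (-1) (-1))).getD 0 := by
          rw [hcons]
          by_cases hx : x = 0
          · simp [lsrFindZero, List.find?, hx]
          · have hfalse : (PySem.List.pyGet? (l ++ [x]) (l.length : Int)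
                == some (0 : Int)) = false := by
              simp [hx]
            simp only [lsrFindZero, List.find?, hfalse, hx, if_false]
            rw [show (List.find? (fun i => PySem.List.pyGet? (l ++ [x]) i == some (0:Int))
                (PySem.List.pyRange ((l.length : Int) - 1) (-1) (-1)))
              = lsrFindZero (l ++ [x]) (PySem.List.pyRange ((l.length : Int) - 1) (-1) (-1)) from rfl]
            rw [hstab1]
            exact h5
        simp only [lsrStepA, lsrStepB, zero_add]
        rw [h1, h2]
        by_cases hv : sA.2 < x
        · rw [if_pos hv, if_pos hv]
          dsimp only
          refine ⟨rfl, rfl, by omega, by rw [hlen]; omega, ?_, ?_⟩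
          · rw [hlen, show (l.length : Int) + 1 - 1 = (l.length : Int) from by ring]
            exact hlz
          · exact hlz
        · rw [if_neg hv, if_neg hv]
          dsimp only
          refine ⟨rfl, rfl, by omega, by rw [hlen]; omega, ?_, ?_⟩
          · rw [hlen, show (l.length : Int) + 1 - 1 = (l.length : Int) from by ring]
            exact hlz
          · rw [hstab2]
            exact h6

theorem largest_sum_range_spec : Claim_equal_largest_sum_range := by
  intro kadane _ _
  unfold Spec_largest_sum_range largest_sum_range largest_sum_range_alt
  obtain ⟨h1, h2, h3, h4, h5, h6⟩ := lsr_inv kadane ((PySem.List.pyGet? kadane 0).getD 0)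
  dsimp only at h2 h6 ⊢
  rw [h6] at *
  cases ho : lsrFindZero kadane (PySem.List.pyRange
      ((PySem.List.enumerate kadane 0).foldl lsrStepA
        (0, (PySem.List.pyGet? kadane 0).getD 0)).1 (-1) (-1)) with
  | none => simp [h2]
  | some i => simp [h2]
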